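-- pv_equiv track=rewrite | github.com/aamerino/Ejercicios | 21.py | numMayorMenor
-- ===== SOURCE A (Python) =====
-- def numMayorMenor(listNum):
--     for i in listNum:
--         if i < 0:
--             return None
--     numeroMayor = listNum[0]
--     numeroMenor = listNum[0]
--     for i in listNum:
--         if i > numeroMayor:
--             numeroMayor = i
--         if i < numeroMenor:
--             numeroMenor = i
--     return (numeroMayor, numeroMenor)
-- ===== SOURCE B (Python) =====
-- def numMayorMenor(listNum):
--     s = sorted(listNum)
--     if s[0] < 0:
--         return None
--     return (s[-1], s[0])
-- ===== Notes on version B (the rewrite author's own statement) =====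
-- stated objective: simpler
-- what changed: Replaces A's two explicit scans (a negativity scan plus a running max/min loop) by sorting once and reading the answer off the ends of the sorted list (min = s[0], max = s[-1]); negativity is detected via the minimum.
import Mathlib
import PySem

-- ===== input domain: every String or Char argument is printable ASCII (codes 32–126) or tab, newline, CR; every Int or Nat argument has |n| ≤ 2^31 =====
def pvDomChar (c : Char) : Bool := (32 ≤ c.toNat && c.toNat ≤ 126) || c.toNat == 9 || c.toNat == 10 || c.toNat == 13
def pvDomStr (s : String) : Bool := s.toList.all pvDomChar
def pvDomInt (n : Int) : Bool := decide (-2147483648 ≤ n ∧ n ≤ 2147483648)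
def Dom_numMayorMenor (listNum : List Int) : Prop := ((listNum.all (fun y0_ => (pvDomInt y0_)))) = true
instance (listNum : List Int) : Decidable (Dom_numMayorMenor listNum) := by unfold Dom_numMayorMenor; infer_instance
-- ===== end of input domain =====

-- B sorts once and reads (max, min) off the ends of the sorted list instead of A's two explicit scans; return values agree on all nonempty lists.

-- ===== PORT A =====
-- A's first loop: return None as soon as a negative element is seen
def numMayorMenorNeg : List Int → Bool
  | [] => false
  | i :: rest => if i < 0 then true else numMayorMenorNeg rest

def numMayorMenor (listNum : List Int) : Option (Int × Int) :=
  if numMayorMenorNeg listNum then none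
  else
    match PySem.List.pyGet? listNum 0 with
    | none => none   -- IndexError on the empty list; outside Pre_
    | some h =>
      let p := listNum.foldl
        (fun (st : Int × Int) i =>
          (if i > st.1 then i else st.1, if i < st.2 then i else st.2)) (h, h)
      some p

-- ===== PORT B =====
def numMayorMenor_alt (listNum : List Int) : Option (Int × Int) :=
  let s := PySem.List.sorted listNum (fun x => x) false
  match PySem.List.pyGet? s 0 with
  | none => none   -- IndexError on the empty list; outside Pre_
  | some m =>
    if m < 0 then none
    else
      match PySem.List.pyGet? s (-1) with
      | none => none
      | some mx => some (mx, m)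

-- ===== PRECONDITION & SPEC =====
-- A raises IndexError (listNum[0]) on the empty list; B raises there too (s[0]).
def Pre_numMayorMenor (listNum : List Int) : Prop := listNum ≠ []
instance (listNum : List Int) : Decidable (Pre_numMayorMenor listNum) := by unfold Pre_numMayorMenor; infer_instance
def pvWitness_numMayorMenor : List Int := [3, 1, 2]

def Spec_numMayorMenor (listNum : List Int) (out : Option (Int × Int)) : Prop := out = numMayorMenor_alt listNum
instance (listNum : List Int) (out : Option (Int × Int)) : Decidable (Spec_numMayorMenor listNum out) := by unfold Spec_numMayorMenor; infer_instance

-- ===== CLAIM (what is proved, stated in full; the proofs are below) =====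
def Claim_equal_numMayorMenor : Prop := ∀ (listNum : List Int), Dom_numMayorMenor listNum → Pre_numMayorMenor listNum → Spec_numMayorMenor listNum (numMayorMenor listNum)

-- ===== LEMMAS AND PROOFS =====

lemma negCheck_iff (l : List Int) : numMayorMenorNeg l = true ↔ ∃ i ∈ l, i < 0 := by
  induction l with
  | nil => simp [numMayorMenorNeg]
  | cons a t ih =>
    by_cases h : a < 0 <;> simp [numMayorMenorNeg, h, ih]

lemma foldA_eq (l : List Int) (a b : Int) :
    l.foldl (fun (st : Int × Int) i =>
      (if i > st.1 then i else st.1, if i < st.2 then i else st.2)) (a, b)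
    = (l.foldl max a, l.foldl min b) := by
  induction l generalizing a b with
  | nil => rfl
  | cons x t ih =>
    have h1 : (if x > a then x else a) = max a x := by split <;> omega
    have h2 : (if x < b then x else b) = min b x := by split <;> omega
    simp only [List.foldl_cons, h1, h2, ih]

lemma foldl_max_mem (l : List Int) (a : Int) : l.foldl max a = a ∨ l.foldl max a ∈ l := by
  induction l generalizing a with
  | nil => left; rfl
  | cons x t ih =>
    rcases ih (max a x) with h | h
    · rcases max_choice a x with hm | hm <;> simp_all [List.foldl_cons]
    · right; simp [h]

lemma foldl_max_ge (l : List Int) (a : Int) :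
    a ≤ l.foldl max a ∧ ∀ y ∈ l, y ≤ l.foldl max a := by
  induction l generalizing a with
  | nil => simp
  | cons x t ih =>
    obtain ⟨h1, h2⟩ := ih (max a x)
    refine ⟨le_trans (le_max_left _ _) h1, ?_⟩
    intro y hy
    rcases List.mem_cons.mp hy with rfl | hy
    · exact le_trans (le_max_right a y) h1
    · exact h2 _ hy

lemma foldl_min_mem (l : List Int) (a : Int) : l.foldl min a = a ∨ l.foldl min a ∈ l := by
  induction l generalizing a with
  | nil => left; rfl
  | cons x t ih =>
    rcases ih (min a x) with h | h
    · rcases min_choice a x with hm | hm <;> simp_all [List.foldl_cons]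
    · right; simp [h]

lemma foldl_min_le (l : List Int) (a : Int) :
    l.foldl min a ≤ a ∧ ∀ y ∈ l, l.foldl min a ≤ y := by
  induction l generalizing a with
  | nil => simp
  | cons x t ih =>
    obtain ⟨h1, h2⟩ := ih (min a x)
    refine ⟨le_trans h1 (min_le_left _ _), ?_⟩
    intro y hy
    rcases List.mem_cons.mp hy with rfl | hy
    · exact le_trans h1 (min_le_right a y)
    · exact h2 _ hy

-- in a ≤-pairwise list, every member is ≤ the last element
lemma mem_le_getLast (s : List Int) (hp : s.Pairwise (· ≤ ·)) :
    ∀ y ∈ s, ∀ z, s.getLast? = some z → y ≤ z := by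
  induction s with
  | nil => intro y hy; cases hy
  | cons a t ih =>
    rcases List.pairwise_cons.mp hp with ⟨ha, hpt⟩
    intro y hy z hz
    cases t with
    | nil =>
      simp only [List.getLast?_singleton, Option.some.injEq] at hz
      rcases List.mem_cons.mp hy with rfl | hy
      · omega
      · cases hy
    | cons b u =>
      have hz' : (b :: u).getLast? = some z := by
        rw [List.getLast?_cons_cons] at hz; exact hz
      rcases List.mem_cons.mp hy with rfl | hy
      · exact le_trans (ha b (by simp)) (ih hpt b (by simp) z hz')
      · exact ih hpt y hy z hz'

theorem numMayorMenor_spec : Claim_equal_numMayorMenor := by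
  intro l _ hpre
  unfold Spec_numMayorMenor numMayorMenor numMayorMenor_alt
  obtain ⟨h, t, rfl⟩ : ∃ h t, l = h :: t := by
    cases l with
    | nil => exact absurd rfl hpre
    | cons h t => exact ⟨h, t, rfl⟩
  set l := h :: t with hl
  -- the sorted list is nonempty
  obtain ⟨m, s, hs⟩ : ∃ m s, PySem.List.sorted l (fun x => x) false = m :: s := by
    cases hsort : PySem.List.sorted l (fun x => x) false with
    | nil => exact absurd ((PySem.List.sorted_eq_nil_iff l (fun x => x) false).mp hsort) hpre
    | cons m s => exact ⟨m, s, rfl⟩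
  have hpw : (PySem.List.sorted l (fun x => x) false).Pairwise (· ≤ ·) := by
    simpa using PySem.List.sorted_pairwise l (fun x => x)
  have hmem_sorted : ∀ y : Int, y ∈ PySem.List.sorted l (fun x => x) false ↔ y ∈ l :=
    fun y => PySem.List.mem_sorted l (fun x => x) false y
  -- m is a lower bound of l and a member of l
  have hm_lb : ∀ y ∈ l, m ≤ y := by
    intro y hy
    simpa using PySem.List.key_head_sorted_le l (fun x => x) hs y hy
  have hm_mem : m ∈ l := (hmem_sorted m).mp (by rw [hs]; simp)
  -- the last element z of sorted l
  obtain ⟨z, hz⟩ : ∃ z, (PySem.List.sorted l (fun x => x) false).getLast? = some z := by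
    rw [hs]; exact ⟨(m :: s).getLast (by simp), List.getLast?_eq_some_getLast (by simp)⟩
  have hz_mem : z ∈ l := (hmem_sorted z).mp (List.mem_of_getLast? hz)
  have hz_ub : ∀ y ∈ l, y ≤ z := fun y hy =>
    mem_le_getLast _ hpw y ((hmem_sorted y).mpr hy) z hz
  -- evaluate B's indexing
  have hget0 : PySem.List.pyGet? (m :: s) 0 = some m := by
    simp
  have hgetlast : PySem.List.pyGet? (m :: s) (-1) = some z := by
    rw [PySem.List.pyGet?_neg_one, ← hs]; exact hz
  have hA0 : PySem.List.pyGet? l 0 = some h := by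
    simp [hl]
  simp only [hs, hget0, hgetlast, hA0, foldA_eq]
  by_cases hneg : numMayorMenorNeg l = true
  · -- some element negative, so m < 0, both sides none
    obtain ⟨i, hi, hineg⟩ := (negCheck_iff l).mp hneg
    have : m < 0 := lt_of_le_of_lt (hm_lb i hi) hineg
    simp [hneg, this]
  · -- no negative element, so 0 ≤ m; fold max = z, fold min = m
    have hnoneg : ∀ i ∈ l, ¬ i < 0 := by
      intro i hi hlt; exact hneg ((negCheck_iff l).mpr ⟨i, hi, hlt⟩)
    have hmnn : ¬ m < 0 := hnoneg m hm_mem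
    have hmax : l.foldl max h = z := by
      have hmem : l.foldl max h ∈ l := by
        rcases foldl_max_mem l h with heq | hm
        · rw [heq, hl]; simp
        · exact hm
      have h1 : l.foldl max h ≤ z := hz_ub _ hmem
      have h2 : z ≤ l.foldl max h := (foldl_max_ge l h).2 z hz_mem
      omega
    have hmin : l.foldl min h = m := by
      have hmem : l.foldl min h ∈ l := by
        rcases foldl_min_mem l h with heq | hm
        · rw [heq, hl]; simp
        · exact hm
      have h1 : m ≤ l.foldl min h := hm_lb _ hmem
      have h2 : l.foldl min h ≤ m := (foldl_min_le l h).2 m hm_mem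
      omega
    simp [hneg, hmnn, hmax, hmin]
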